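-- pv_equiv track=rewrite | github.com/mayasoleimani/leetcode_solutions | Solutions/leet433.py | starting
-- ===== SOURCE A (Python) =====
-- from collections import deque
--
-- def starting(start,end,allowed):
--
--     visited=set()
--     queue=deque()
--     count=0
--     direct=["a","b","c"]
--     word=0
--
--     visited.add(start)
--     queue.append(start)
--
--     while queue:
--
--         for _ in range(len(queue)):
--             curr=queue.popleft()
--
--             if curr == end:
--                 return count
--
--             for i in range(len(list(start))):
--                 for j in range(len(direct)):
--                     word=curr[:i]+direct[j]+curr[i+1:]
--
--                     if word not in visited and word in allowed:
--                         queue.append(word)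
--                         visited.add(word)
--         count+=1
--     return -1
-- ===== SOURCE B (Python) =====
-- def starting(start, end, allowed):
--     allowed_set = set(allowed)
--     dist = {start: 0}
--     while True:
--         if end in dist:
--             return dist[end]
--         ndist = dict(dist)
--         changed = False
--         for w, dw in dist.items():
--             nd = dw + 1
--             for i in range(len(start)):
--                 for c in "abc":
--                     m = w[:i] + c + w[i + 1:]
--                     if m in allowed_set and (m not in ndist or ndist[m] > nd):
--                         ndist[m] = nd
--                         changed = True
--         if not changed:
--             return -1
--         dist = ndist
-- ===== Notes on version B (the rewrite author's own statement) =====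
-- stated objective: faster
-- what changed: Replaces A's queue-and-visited level-by-level BFS by Bellman-Ford-style relaxation: B keeps a distance dict {word: steps}, repeatedly relaxes every single-letter mutation of every known word over the whole dict until the end gene acquires a distance or a full round changes nothing (then -1); there is no queue, no visited set and no per-level traversal, and candidate membership is a hash-set test instead of A's scan of the allowed list.
import Mathlib
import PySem

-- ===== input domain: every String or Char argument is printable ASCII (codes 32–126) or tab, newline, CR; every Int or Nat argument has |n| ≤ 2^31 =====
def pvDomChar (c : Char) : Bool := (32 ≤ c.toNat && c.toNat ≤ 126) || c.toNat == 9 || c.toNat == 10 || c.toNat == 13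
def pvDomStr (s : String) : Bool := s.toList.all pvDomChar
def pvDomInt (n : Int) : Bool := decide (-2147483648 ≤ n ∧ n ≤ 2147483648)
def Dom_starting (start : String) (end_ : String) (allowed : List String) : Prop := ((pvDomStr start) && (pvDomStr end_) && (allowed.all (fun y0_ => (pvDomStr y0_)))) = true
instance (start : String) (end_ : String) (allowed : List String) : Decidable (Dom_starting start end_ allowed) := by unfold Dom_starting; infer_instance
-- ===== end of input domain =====

-- B replaces A's queue-and-visited BFS by Bellman-Ford-style relaxation: it keeps a
-- distance dict {word: steps} and repeatedly relaxes all single-letter mutations of the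
-- known words until the end gene gets a distance or a round changes nothing (then -1).
-- Both unbounded loops are ported with fuel `allowed.length + 2`, which exceeds the number
-- of iterations either loop can make (each non-final iteration visits a new allowed word).

-- ===== PORT A =====
def pvDirect : List String := ["a", "b", "c"]

-- body of A's `if word not in visited and word in allowed: queue.append(word); visited.add(word)`
def pvUpd (allowed : List String) (st : PySem.Set String × List String) (word : String) :
    PySem.Set String × List String :=
  if !(PySem.Set.contains st.1 word) && allowed.contains word then
    (PySem.Set.add st.1 word, st.2 ++ [word])
  else st

-- A's two inner `for i` / `for j` loops for one popped word `curr`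
def pvStepA (allowed : List String) (start curr : String)
    (st : PySem.Set String × List String) : PySem.Set String × List String :=
  (PySem.List.pyRange 0 (PySem.Str.len start) 1).foldl (fun st i =>
    (PySem.List.pyRange 0 (PySem.List.len pvDirect) 1).foldl (fun st j =>
      pvUpd allowed st
        (PySem.Str.slice curr none (some i) ++ PySem.List.pyGetD pvDirect j "" ++
          PySem.Str.slice curr (some (i + 1)) none)) st) st

-- A's `for _ in range(len(queue)): curr = queue.popleft(); …`: the popped items are exactly the
-- queue at loop entry, appends accumulate behind them; `none` = the `return count` branch fired
def pvLevelA (start end_ : String) (allowed : List String) :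
    List String → PySem.Set String → List String → Option (PySem.Set String × List String)
  | [], vis, newq => some (vis, newq)
  | curr :: rest, vis, newq =>
      if curr == end_ then none
      else
        let st := pvStepA allowed start curr (vis, newq)
        pvLevelA start end_ allowed rest st.1 st.2

-- A's `while queue:` (fuel-guarded; fuel `allowed.length + 2` is never exhausted)
def pvLoopA (start end_ : String) (allowed : List String) :
    Nat → PySem.Set String → List String → Int → Int
  | 0, _, _, _ => -1
  | fuel + 1, vis, queue, count =>
      if queue.isEmpty then -1
      else
        match pvLevelA start end_ allowed queue vis [] with
        | none => count
        | some (vis', queue') => pvLoopA start end_ allowed fuel vis' queue' (count + 1)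

def starting (start : String) (end_ : String) (allowed : List String) : Int :=
  pvLoopA start end_ allowed (allowed.length + 2)
    (PySem.Set.add PySem.Set.empty start) [start] 0

-- ===== PORT B =====
-- body of B's `if m in allowed_set and (m not in ndist or ndist[m] > nd): ndist[m] = nd; changed = True`
def pvUpdB (aset : PySem.Set String) (nd : Int)
    (st : PySem.Dict String Int × Bool) (m : String) : PySem.Dict String Int × Bool :=
  if PySem.Set.contains aset m then
    match st.1.get? m with
    | none => (st.1.insert m nd, true)
    | some v => if nd < v then (st.1.insert m nd, true) else st
  else st

-- B's `for i in range(len(start)): for c in "abc": m = w[:i]+c+w[i+1:]; …` for one dict item w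
def pvRelaxWord (aset : PySem.Set String) (start w : String) (nd : Int)
    (st : PySem.Dict String Int × Bool) : PySem.Dict String Int × Bool :=
  (PySem.List.pyRange 0 (PySem.Str.len start) 1).foldl (fun st i =>
    "abc".toList.foldl (fun st c =>
      pvUpdB aset nd st
        (PySem.Str.slice w none (some i) ++ String.singleton c ++
          PySem.Str.slice w (some (i + 1)) none)) st) st

-- B's `ndist = dict(dist); changed = False; for w, dw in dist.items(): …`
def pvRound (aset : PySem.Set String) (start : String) (dist : PySem.Dict String Int) :
    PySem.Dict String Int × Bool :=
  dist.items.foldl (fun st p => pvRelaxWord aset start p.1 (p.2 + 1) st) (dist, false)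

-- B's `while True:` (fuel-guarded; fuel `allowed.length + 2` is never exhausted)
def pvLoopB (start end_ : String) (aset : PySem.Set String) :
    Nat → PySem.Dict String Int → Int
  | 0, _ => -1
  | fuel + 1, dist =>
      match dist.get? end_ with
      | some v => v
      | none =>
          let r := pvRound aset start dist
          if r.2 then pvLoopB start end_ aset fuel r.1 else -1

def starting_alt (start : String) (end_ : String) (allowed : List String) : Int :=
  pvLoopB start end_ (PySem.Set.ofList allowed) (allowed.length + 2)
    ((PySem.Dict.empty : PySem.Dict String Int).insert start 0)

-- ===== PRECONDITION & SPEC =====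
def Spec_starting (start : String) (end_ : String) (allowed : List String) (out : Int) : Prop := out = starting_alt start end_ allowed
instance (start : String) (end_ : String) (allowed : List String) (out : Int) : Decidable (Spec_starting start end_ allowed out) := by unfold Spec_starting; infer_instance

-- ===== CLAIM (what is proved, stated in full; the proofs are below) =====
def Claim_equal_starting : Prop := ∀ (start : String) (end_ : String) (allowed : List String), Dom_starting start end_ allowed → Spec_starting start end_ allowed (starting start end_ allowed)

-- ===== LEMMAS AND PROOFS =====

-- the three single-position mutations of `curr` at index i (both programs generate exactly these)
def pvMut (curr : String) (i : Int) : List String :=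
  [PySem.Str.slice curr none (some i) ++ "a" ++ PySem.Str.slice curr (some (i + 1)) none,
   PySem.Str.slice curr none (some i) ++ "b" ++ PySem.Str.slice curr (some (i + 1)) none,
   PySem.Str.slice curr none (some i) ++ "c" ++ PySem.Str.slice curr (some (i + 1)) none]

-- x is a candidate mutation of w (positions taken from `start`, as both programs do)
def pvCand (start w x : String) : Prop :=
  ∃ i ∈ PySem.List.pyRange 0 (PySem.Str.len start) 1, x ∈ pvMut w i

-- ---- A-side characterisation ----

lemma pvStepA_eq (allowed : List String) (start curr : String) (st) :
    pvStepA allowed start curr st =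
      (PySem.List.pyRange 0 (PySem.Str.len start) 1).foldl
        (fun st i => (pvMut curr i).foldl (pvUpd allowed) st) st := by
  unfold pvStepA
  refine List.foldl_ext _ _ st (fun st i _ => ?_)
  have h3 : PySem.List.pyRange 0 (PySem.List.len pvDirect) 1 = [0, 1, 2] := by decide
  have ha : PySem.List.pyGetD pvDirect 0 "" = "a" := by decide
  have hb : PySem.List.pyGetD pvDirect 1 "" = "b" := by decide
  have hc : PySem.List.pyGetD pvDirect 2 "" = "c" := by decide
  rw [h3]
  simp [List.foldl, pvMut, ha, hb, hc]

lemma foldUpd_mem (allowed : List String) (L : List String) :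
    ∀ st : PySem.Set String × List String,
      (∀ x, x ∈ (L.foldl (pvUpd allowed) st).1 ↔ x ∈ st.1 ∨ (x ∈ L ∧ x ∈ allowed)) ∧
      (∀ x, x ∈ (L.foldl (pvUpd allowed) st).2 ↔ x ∈ st.2 ∨ (x ∈ L ∧ x ∈ allowed ∧ x ∉ st.1)) := by
  induction L with
  | nil => intro st; simp
  | cons w L ih =>
      intro st
      simp only [List.foldl_cons]
      obtain ⟨ih1, ih2⟩ := ih (pvUpd allowed st w)
      have hmem : (∀ x, x ∈ (pvUpd allowed st w).1 ↔ x ∈ st.1 ∨ (w = x ∧ x ∈ allowed)) ∧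
          (∀ x, x ∈ (pvUpd allowed st w).2 ↔ x ∈ st.2 ∨ (w = x ∧ x ∈ allowed ∧ x ∉ st.1)) := by
        unfold pvUpd
        by_cases h1 : w ∈ st.1 <;> by_cases h2 : w ∈ allowed <;>
          simp [h1, h2] <;> constructor <;> intro x <;>
          constructor <;> rintro (h | ⟨rfl, _⟩) <;> simp_all <;> tauto
      constructor <;> intro x
      · rw [ih1, hmem.1 x]
        simp only [List.mem_cons]
        constructor
        · rintro ((h | ⟨rfl, h⟩) | ⟨h, h'⟩) <;> tauto
        · rintro (h | ⟨(h | h), h'⟩) <;> tauto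
      · rw [ih2, hmem.2 x, hmem.1 x]
        simp only [List.mem_cons]
        constructor
        · rintro ((h | ⟨rfl, h, h'⟩) | ⟨h, h', h''⟩) <;> tauto
        · rintro (h | ⟨(rfl | h), h', h''⟩) <;> tauto

lemma stepA_mem (allowed : List String) (start curr : String) (st) :
    (∀ x, x ∈ (pvStepA allowed start curr st).1 ↔
        x ∈ st.1 ∨ (pvCand start curr x ∧ x ∈ allowed)) ∧
    (∀ x, x ∈ (pvStepA allowed start curr st).2 ↔
        x ∈ st.2 ∨ (pvCand start curr x ∧ x ∈ allowed ∧ x ∉ st.1)) := by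
  rw [pvStepA_eq]
  unfold pvCand
  generalize PySem.List.pyRange 0 (PySem.Str.len start) 1 = is
  induction is generalizing st with
  | nil => simp
  | cons i is ih =>
      simp only [List.foldl_cons]
      obtain ⟨ih1, ih2⟩ := ih ((pvMut curr i).foldl (pvUpd allowed) st)
      obtain ⟨h1, h2⟩ := foldUpd_mem allowed (pvMut curr i) st
      constructor <;> intro x
      · rw [ih1, h1 x]
        simp only [List.mem_cons]
        constructor
        · rintro ((h | ⟨h, h'⟩) | ⟨⟨j, hj, hx⟩, h'⟩) <;> [tauto; exact Or.inr ⟨⟨i, by tauto, h⟩, h'⟩;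
            exact Or.inr ⟨⟨j, by tauto, hx⟩, h'⟩]
        · rintro (h | ⟨⟨j, (rfl | hj), hx⟩, h'⟩) <;> tauto
      · rw [ih2, h2 x, h1 x]
        constructor
        · rintro ((h | ⟨h, h', h''⟩) | ⟨⟨j, hj, hx⟩, h', h''⟩)
          · tauto
          · exact Or.inr ⟨⟨i, by simp, h⟩, h', h''⟩
          · refine Or.inr ⟨⟨j, by simp at hj ⊢; tauto, hx⟩, h', fun hv => h'' (Or.inl hv)⟩
        · rintro (h | ⟨⟨j, hj, hx⟩, h', h''⟩)
          · tauto
          · simp only [List.mem_cons] at hj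
            rcases hj with rfl | hj
            · exact Or.inl (Or.inr ⟨hx, h', h''⟩)
            · by_cases hc : x ∈ (pvMut curr i) ∧ x ∈ allowed
              · exact Or.inl (Or.inr ⟨hc.1, hc.2, h''⟩)
              · exact Or.inr ⟨⟨j, hj, hx⟩, h', fun hv => hc.elim (by tauto)⟩

lemma levelA_none_iff (start end_ : String) (allowed : List String) (items : List String) :
    ∀ vis newq, pvLevelA start end_ allowed items vis newq = none ↔ end_ ∈ items := by
  induction items with
  | nil => intro vis newq; simp [pvLevelA]
  | cons w rest ih =>
      intro vis newq
      unfold pvLevelA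
      by_cases h : w = end_
      · simp [h]
      · simp only [beq_iff_eq, h, if_false, ih, List.mem_cons]
        tauto

lemma levelA_some (start end_ : String) (allowed : List String) (items : List String)
    (hend : end_ ∉ items) :
    ∀ vis newq, ∃ vis' newq',
      pvLevelA start end_ allowed items vis newq = some (vis', newq') ∧
      (∀ x, x ∈ vis' ↔ x ∈ vis ∨ ((∃ w ∈ items, pvCand start w x) ∧ x ∈ allowed)) ∧
      (∀ x, x ∈ newq' ↔ x ∈ newq ∨ ((∃ w ∈ items, pvCand start w x) ∧ x ∈ allowed ∧ x ∉ vis)) := by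
  induction items with
  | nil => intro vis newq; exact ⟨vis, newq, rfl, by simp, by simp⟩
  | cons w rest ih =>
      intro vis newq
      have hw : w ≠ end_ := fun h => hend (by simp [h])
      have hrest : end_ ∉ rest := fun h => hend (by simp [h])
      obtain ⟨s1, s2⟩ := stepA_mem allowed start w (vis, newq)
      obtain ⟨vis', newq', heq, hv, hq⟩ :=
        ih hrest (pvStepA allowed start w (vis, newq)).1 (pvStepA allowed start w (vis, newq)).2
      refine ⟨vis', newq', ?_, ?_, ?_⟩
      · unfold pvLevelA
        simp only [beq_iff_eq, hw, if_false]
        exact heq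
      · intro x
        rw [hv x, s1 x]
        simp only [List.mem_cons]
        constructor
        · rintro ((h | ⟨h, h'⟩) | ⟨⟨u, hu, hx⟩, h'⟩)
          · exact Or.inl h
          · exact Or.inr ⟨⟨w, Or.inl rfl, h⟩, h'⟩
          · exact Or.inr ⟨⟨u, Or.inr hu, hx⟩, h'⟩
        · rintro (h | ⟨⟨u, (rfl | hu), hx⟩, h'⟩)
          · exact Or.inl (Or.inl h)
          · exact Or.inl (Or.inr ⟨hx, h'⟩)
          · exact Or.inr ⟨⟨u, hu, hx⟩, h'⟩
      · intro x
        rw [hq x, s2 x, s1 x]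
        simp only [List.mem_cons]
        constructor
        · rintro ((h | ⟨h, h', h''⟩) | ⟨⟨u, hu, hx⟩, h', h''⟩)
          · tauto
          · exact Or.inr ⟨⟨w, Or.inl rfl, h⟩, h', h''⟩
          · exact Or.inr ⟨⟨u, Or.inr hu, hx⟩, h', fun hv' => h'' (Or.inl hv')⟩
        · rintro (h | ⟨⟨u, (rfl | hu), hx⟩, h', h''⟩)
          · tauto
          · exact Or.inl (Or.inr ⟨hx, h', h''⟩)
          · by_cases hc : pvCand start w x ∧ x ∈ allowed
            · exact Or.inl (Or.inr ⟨hc.1, hc.2, h''⟩)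
            · exact Or.inr ⟨⟨u, hu, hx⟩, h', fun hv' => hc.elim (by tauto)⟩

-- a run of A's loop with an empty queue returns -1 whatever the fuel
lemma loopA_nil (start end_ : String) (allowed : List String) (fuel : Nat)
    (vis : PySem.Set String) (k : Int) :
    pvLoopA start end_ allowed fuel vis [] k = -1 := by
  cases fuel <;> simp [pvLoopA]

-- ---- B-side characterisation ----

-- B's distance dict after k rounds: values on the current frontier qA are k, values are ≤ k,
-- and every allowed mutation of a non-frontier key is already a key (so rounds only grow from qA)
def pvInv (allowed : List String) (start : String) (k : Int) (qA : List String)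
    (dist : PySem.Dict String Int) : Prop :=
  dist.keys.Nodup ∧
  (∀ x, dist.get? x = some k ↔ x ∈ qA) ∧
  (∀ x v, dist.get? x = some v → v ≤ k) ∧
  (∀ w x dw, dist.get? w = some dw → dw < k → pvCand start w x → x ∈ allowed →
    ∃ v, dist.get? x = some v ∧ v ≤ dw + 1)

-- mid-round state: cur extends dist, every new entry has value k+1 and is an allowed mutation
-- of a frontier word, and `changed` records exactly whether a new entry exists
def pvMid (allowed : List String) (start : String) (k : Int) (qA : List String)
    (dist cur : PySem.Dict String Int) (ch : Bool) : Prop :=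
  cur.keys.Nodup ∧
  (∀ x v, dist.get? x = some v → cur.get? x = some v) ∧
  (∀ x v, dist.get? x = none → cur.get? x = some v →
    v = k + 1 ∧ x ∈ allowed ∧ ∃ w ∈ qA, pvCand start w x) ∧
  (ch = true ↔ ∃ x, dist.get? x = none ∧ (cur.get? x).isSome)

lemma updB_mid (allowed : List String) (start : String) (k : Int) (qA : List String)
    (dist : PySem.Dict String Int) (st : PySem.Dict String Int × Bool) (w m : String) (dw : Int)
    (hinv : pvInv allowed start k qA dist)
    (hmid : pvMid allowed start k qA dist st.1 st.2)
    (hw : dist.get? w = some dw) (hcand : pvCand start w m) :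
    pvMid allowed start k qA dist
      (pvUpdB (PySem.Set.ofList allowed) (dw + 1) st m).1
      (pvUpdB (PySem.Set.ofList allowed) (dw + 1) st m).2 ∧
    (∀ x v, st.1.get? x = some v →
      ((pvUpdB (PySem.Set.ofList allowed) (dw + 1) st m).1).get? x = some v) ∧
    (dw = k → m ∈ allowed →
      (((pvUpdB (PySem.Set.ofList allowed) (dw + 1) st m).1).get? m).isSome) := by
  obtain ⟨cur, ch⟩ := st
  obtain ⟨hnd, h2, h3, h4⟩ := hinv
  obtain ⟨cnd, cmono, cnew, cch⟩ := hmid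
  have hdwk : dw ≤ k := h3 w dw hw
  unfold pvUpdB
  by_cases hm : m ∈ allowed
  · have hcont : PySem.Set.contains (PySem.Set.ofList allowed) m = true := by
      rw [PySem.Set.contains_iff, PySem.Set.mem_ofList]; exact hm
    simp only [hcont, if_true]
    rcases hcm : cur.get? m with _ | v
    · -- m not yet a key: a fresh insert with value dw+1 (necessarily dw = k)
      have hdm : dist.get? m = none := by
        rcases hdm : dist.get? m with _ | u
        · rfl
        · exact absurd (cmono m u hdm) (by rw [hcm]; simp)
      have hdweq : dw = k := by
        rcases lt_or_eq_of_le hdwk with hlt | heq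
        · obtain ⟨v', hv', _⟩ := h4 w m dw hw hlt hcand hm
          rw [hdm] at hv'; exact absurd hv' (by simp)
        · exact heq
      refine ⟨⟨PySem.Dict.nodup_keys_insert _ _ _ cnd, ?_, ?_, ?_⟩, ?_, ?_⟩
      · intro x v' hx
        have hne : x ≠ m := fun h => by rw [h, hdm] at hx; exact absurd hx (by simp)
        rw [PySem.Dict.get?_insert_of_ne _ _ hne]
        exact cmono x v' hx
      · intro x v' hx hx'
        by_cases hxm : x = m
        · subst hxm
          rw [PySem.Dict.get?_insert_self] at hx'
          injection hx' with hv'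
          exact ⟨by omega, hm, w, (h2 w).1 (by rw [← hdweq]; exact hw), hcand⟩
        · rw [PySem.Dict.get?_insert_of_ne _ _ hxm] at hx'
          exact cnew x v' hx hx'
      · simp only [true_iff]
        exact ⟨m, hdm, by rw [PySem.Dict.get?_insert_self]; rfl⟩
      · intro x v' hx
        have hne : x ≠ m := fun h => by rw [h, hcm] at hx; cases hx
        rw [PySem.Dict.get?_insert_of_ne _ _ hne]; exact hx
      · intro _ _
        rw [PySem.Dict.get?_insert_self]; rfl
    · -- m already a key: its value is at most dw+1, so the guard never fires
      have hnlt : ¬ dw + 1 < v := by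
        rcases hdm : dist.get? m with _ | u
        · obtain ⟨hv, _, _⟩ := cnew m v hdm hcm
          have : dw = k := by
            rcases lt_or_eq_of_le hdwk with hlt | heq
            · obtain ⟨v', hv', _⟩ := h4 w m dw hw hlt hcand hm
              rw [hdm] at hv'; exact absurd hv' (by simp)
            · exact heq
          omega
        · have : cur.get? m = some u := cmono m u hdm
          rw [hcm] at this
          injection this with huv
          subst huv
          rcases lt_or_eq_of_le hdwk with hlt | heq
          · obtain ⟨v', hv', hle⟩ := h4 w m dw hw hlt hcand hm
            rw [hdm] at hv'
            injection hv' with h'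
            omega
          · have := h3 m v hdm
            omega
      simp only [if_neg hnlt]
      exact ⟨⟨cnd, cmono, cnew, cch⟩, fun x v' hx => hx, fun _ _ => by rw [hcm]; rfl⟩
  · have hcont : PySem.Set.contains (PySem.Set.ofList allowed) m = false := by
      rw [← Bool.not_eq_true, PySem.Set.contains_iff, PySem.Set.mem_ofList]; exact hm
    simp only [hcont, Bool.false_eq_true, if_false]
    exact ⟨⟨cnd, cmono, cnew, cch⟩, fun x v' hx => hx, fun _ h => absurd h hm⟩

lemma foldUpdB_mid (allowed : List String) (start : String) (k : Int) (qA : List String)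
    (dist : PySem.Dict String Int) (w : String) (dw : Int) (ms : List String)
    (hinv : pvInv allowed start k qA dist) (hw : dist.get? w = some dw)
    (hms : ∀ m ∈ ms, pvCand start w m) :
    ∀ st, pvMid allowed start k qA dist st.1 st.2 →
      pvMid allowed start k qA dist
        (ms.foldl (pvUpdB (PySem.Set.ofList allowed) (dw + 1)) st).1
        (ms.foldl (pvUpdB (PySem.Set.ofList allowed) (dw + 1)) st).2 ∧
      (∀ x v, st.1.get? x = some v →
        ((ms.foldl (pvUpdB (PySem.Set.ofList allowed) (dw + 1)) st).1).get? x = some v) ∧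
      (dw = k → ∀ m ∈ ms, m ∈ allowed →
        (((ms.foldl (pvUpdB (PySem.Set.ofList allowed) (dw + 1)) st).1).get? m).isSome) := by
  induction ms with
  | nil => exact fun st hmid => ⟨hmid, fun x v hx => hx, fun _ m hm => absurd hm List.not_mem_nil⟩
  | cons m ms ih =>
      intro st hmid
      obtain ⟨h1, h2, h3⟩ :=
        updB_mid allowed start k qA dist st w m dw ⟨hinv.1, hinv.2.1, hinv.2.2.1, hinv.2.2.2⟩
          hmid hw (hms m (List.mem_cons_self))
      obtain ⟨g1, g2, g3⟩ :=
        ih (fun m' hm' => hms m' (List.mem_cons_of_mem _ hm'))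
          (pvUpdB (PySem.Set.ofList allowed) (dw + 1) st m) h1
      simp only [List.foldl_cons]
      refine ⟨g1, fun x v hx => g2 x v (h2 x v hx), ?_⟩
      intro hdwk m' hm' hma
      rcases List.mem_cons.1 hm' with rfl | hm'
      · obtain ⟨v, hv⟩ := Option.isSome_iff_exists.mp (h3 hdwk hma)
        rw [g2 m' v hv]; rfl
      · exact g3 hdwk m' hm' hma

lemma pvRelaxWord_eq (aset : PySem.Set String) (start w : String) (nd : Int) (st) :
    pvRelaxWord aset start w nd st =
      (PySem.List.pyRange 0 (PySem.Str.len start) 1).foldl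
        (fun st i => (pvMut w i).foldl (pvUpdB aset nd) st) st := by
  unfold pvRelaxWord
  refine List.foldl_ext _ _ st (fun st i _ => ?_)
  have habc : "abc".toList = ['a', 'b', 'c'] := rfl
  have ha : String.singleton 'a' = "a" := rfl
  have hb : String.singleton 'b' = "b" := rfl
  have hc : String.singleton 'c' = "c" := rfl
  rw [habc]
  simp [List.foldl, pvMut, ha, hb, hc]

lemma foldMut_mid (allowed : List String) (start : String) (k : Int) (qA : List String)
    (dist : PySem.Dict String Int) (w : String) (dw : Int) (is : List Int)
    (hinv : pvInv allowed start k qA dist) (hw : dist.get? w = some dw)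
    (his : ∀ i ∈ is, i ∈ PySem.List.pyRange 0 (PySem.Str.len start) 1) :
    ∀ st, pvMid allowed start k qA dist st.1 st.2 →
      pvMid allowed start k qA dist
        (is.foldl (fun st i => (pvMut w i).foldl (pvUpdB (PySem.Set.ofList allowed) (dw + 1)) st) st).1
        (is.foldl (fun st i => (pvMut w i).foldl (pvUpdB (PySem.Set.ofList allowed) (dw + 1)) st) st).2 ∧
      (∀ x v, st.1.get? x = some v →
        ((is.foldl (fun st i => (pvMut w i).foldl (pvUpdB (PySem.Set.ofList allowed) (dw + 1)) st) st).1).get? x = some v) ∧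
      (dw = k → ∀ i ∈ is, ∀ x ∈ pvMut w i, x ∈ allowed →
        (((is.foldl (fun st i => (pvMut w i).foldl (pvUpdB (PySem.Set.ofList allowed) (dw + 1)) st) st).1).get? x).isSome) := by
  induction is with
  | nil => exact fun st hmid => ⟨hmid, fun x v hx => hx, fun _ i hi => absurd hi List.not_mem_nil⟩
  | cons i is ih =>
      intro st hmid
      obtain ⟨h1, h2, h3⟩ :=
        foldUpdB_mid allowed start k qA dist w dw (pvMut w i) hinv hw
          (fun m hm => ⟨i, his i List.mem_cons_self, hm⟩) st hmid
      obtain ⟨g1, g2, g3⟩ :=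
        ih (fun i' hi' => his i' (List.mem_cons_of_mem _ hi'))
          ((pvMut w i).foldl (pvUpdB (PySem.Set.ofList allowed) (dw + 1)) st) h1
      simp only [List.foldl_cons]
      refine ⟨g1, fun x v hx => g2 x v (h2 x v hx), ?_⟩
      intro hdwk i' hi' x hx hxa
      rcases List.mem_cons.1 hi' with rfl | hi'
      · obtain ⟨v, hv⟩ := Option.isSome_iff_exists.mp (h3 hdwk x hx hxa)
        rw [g2 x v hv]; rfl
      · exact g3 hdwk i' hi' x hx hxa

lemma relaxWord_mid (allowed : List String) (start : String) (k : Int) (qA : List String)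
    (dist : PySem.Dict String Int) (w : String) (dw : Int)
    (hinv : pvInv allowed start k qA dist) (hw : dist.get? w = some dw) :
    ∀ st, pvMid allowed start k qA dist st.1 st.2 →
      pvMid allowed start k qA dist
        (pvRelaxWord (PySem.Set.ofList allowed) start w (dw + 1) st).1
        (pvRelaxWord (PySem.Set.ofList allowed) start w (dw + 1) st).2 ∧
      (∀ x v, st.1.get? x = some v →
        ((pvRelaxWord (PySem.Set.ofList allowed) start w (dw + 1) st).1).get? x = some v) ∧
      (dw = k → ∀ x, pvCand start w x → x ∈ allowed →
        (((pvRelaxWord (PySem.Set.ofList allowed) start w (dw + 1) st).1).get? x).isSome) := by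
  intro st hmid
  rw [pvRelaxWord_eq]
  obtain ⟨h1, h2, h3⟩ :=
    foldMut_mid allowed start k qA dist w dw (PySem.List.pyRange 0 (PySem.Str.len start) 1)
      hinv hw (fun i hi => hi) st hmid
  exact ⟨h1, h2, fun hdwk x hc hxa => hc.elim (fun i hi => h3 hdwk i hi.1 x hi.2 hxa)⟩

lemma round_mid (allowed : List String) (start : String) (k : Int) (qA : List String)
    (dist : PySem.Dict String Int) (hinv : pvInv allowed start k qA dist) :
    pvMid allowed start k qA dist
      (pvRound (PySem.Set.ofList allowed) start dist).1
      (pvRound (PySem.Set.ofList allowed) start dist).2 ∧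
    (∀ x, dist.get? x = none → x ∈ allowed → (∃ w ∈ qA, pvCand start w x) →
      (((pvRound (PySem.Set.ofList allowed) start dist).1).get? x).isSome) := by
  have aux : ∀ (L : List (String × Int)), (∀ p ∈ L, dist.get? p.1 = some p.2) →
      ∀ st, pvMid allowed start k qA dist st.1 st.2 →
        pvMid allowed start k qA dist
          (L.foldl (fun st p => pvRelaxWord (PySem.Set.ofList allowed) start p.1 (p.2 + 1) st) st).1
          (L.foldl (fun st p => pvRelaxWord (PySem.Set.ofList allowed) start p.1 (p.2 + 1) st) st).2 ∧
        (∀ x v, st.1.get? x = some v →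
          ((L.foldl (fun st p => pvRelaxWord (PySem.Set.ofList allowed) start p.1 (p.2 + 1) st) st).1).get? x = some v) ∧
        (∀ p ∈ L, p.2 = k → ∀ x, pvCand start p.1 x → x ∈ allowed →
          (((L.foldl (fun st p => pvRelaxWord (PySem.Set.ofList allowed) start p.1 (p.2 + 1) st) st).1).get? x).isSome) := by
    intro L
    induction L with
    | nil => exact fun _ st hmid => ⟨hmid, fun x v hx => hx, fun p hp => absurd hp List.not_mem_nil⟩
    | cons p L ih =>
        intro hL st hmid
        obtain ⟨h1, h2, h3⟩ :=
          relaxWord_mid allowed start k qA dist p.1 p.2 hinv (hL p List.mem_cons_self) st hmid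
        obtain ⟨g1, g2, g3⟩ :=
          ih (fun p' hp' => hL p' (List.mem_cons_of_mem _ hp'))
            (pvRelaxWord (PySem.Set.ofList allowed) start p.1 (p.2 + 1) st) h1
        simp only [List.foldl_cons]
        refine ⟨g1, fun x v hx => g2 x v (h2 x v hx), ?_⟩
        intro p' hp' hpk x hc hxa
        rcases List.mem_cons.1 hp' with rfl | hp'
        · obtain ⟨v, hv⟩ := Option.isSome_iff_exists.mp (h3 hpk x hc hxa)
          rw [g2 x v hv]; rfl
        · exact g3 p' hp' hpk x hc hxa
  obtain ⟨h1, _, h3⟩ := aux dist.items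
    (fun p hp => PySem.Dict.get?_of_mem_items dist (by exact hp) hinv.1) (dist, false)
    ⟨hinv.1, fun x v hx => hx,
     fun x v hx hx' => absurd hx' (by rw [hx]; simp),
     by simp⟩
  refine ⟨h1, ?_⟩
  intro x hx hxa ⟨w', hw', hc⟩
  have hwk : dist.get? w' = some k := (hinv.2.1 w').2 hw'
  exact h3 (w', k) (PySem.Dict.mem_items_of_get?_eq_some dist hwk) rfl x hc hxa

lemma loop_eq (start end_ : String) (allowed : List String) : ∀ (fuel : Nat)
    (vis : PySem.Set String) (qA : List String) (k : Int) (dist : PySem.Dict String Int),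
    (∀ x, (dist.get? x).isSome ↔ x ∈ vis) →
    pvInv allowed start k qA dist →
    (∀ v, dist.get? end_ = some v → end_ ∈ qA) →
    pvLoopA start end_ allowed fuel vis qA k =
      pvLoopB start end_ (PySem.Set.ofList allowed) fuel dist := by
  intro fuel
  induction fuel with
  | zero => intro vis qA k dist _ _ _; rfl
  | succ fuel ih =>
      intro vis qA k dist h1 hinv h5
      obtain ⟨hnd, h2, h3, h4⟩ := hinv
      by_cases hend : end_ ∈ qA
      · have hq : qA.isEmpty = false := by
          cases qA with
          | nil => exact absurd hend List.not_mem_nil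
          | cons a l => rfl
        have hB : dist.get? end_ = some k := (h2 end_).2 hend
        unfold pvLoopA pvLoopB
        rw [(levelA_none_iff start end_ allowed qA vis []).2 hend, hB]
        simp [hq]
      · have hBe : dist.get? end_ = none := by
          rcases hc : dist.get? end_ with _ | v
          · rfl
          · exact absurd (h5 v hc) hend
        obtain ⟨hmidR, hcomp⟩ := round_mid allowed start k qA dist ⟨hnd, h2, h3, h4⟩
        obtain ⟨rnd, rmono, rnew, rch⟩ := hmidR
        by_cases hqnil : qA = []
        · subst hqnil
          have hch : (pvRound (PySem.Set.ofList allowed) start dist).2 = false := by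
            rcases hc : (pvRound (PySem.Set.ofList allowed) start dist).2 with _ | _
            · rfl
            · obtain ⟨x, hx1, hx2⟩ := rch.1 hc
              obtain ⟨v, hv⟩ := Option.isSome_iff_exists.mp hx2
              obtain ⟨_, _, w, hw, _⟩ := rnew x v hx1 hv
              exact absurd hw List.not_mem_nil
          unfold pvLoopA pvLoopB
          rw [hBe]
          simp [hch]
        · have hq : qA.isEmpty = false := by
            cases qA with
            | nil => exact absurd rfl hqnil
            | cons a l => rfl
          obtain ⟨vis', q', heq, hv, hq'⟩ := levelA_some start end_ allowed qA hend vis []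
          have hnotvis : ∀ x, dist.get? x = none → x ∉ vis := by
            intro x hx hxv
            have := (h1 x).2 hxv
            rw [hx] at this
            exact absurd this (by simp)
          rcases hch : (pvRound (PySem.Set.ofList allowed) start dist).2 with _ | _
          · -- no relaxation fired: the new frontier is empty and both sides give -1
            have hq'nil : q' = [] := by
              rw [List.eq_nil_iff_forall_not_mem]
              intro x hx
              rcases (hq' x).1 hx with hx' | ⟨⟨w, hw, hc⟩, hxa, hxv⟩
              · exact absurd hx' List.not_mem_nil
              · have hxd : dist.get? x = none := by
                  rcases hc2 : dist.get? x with _ | v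
                  · rfl
                  · exact absurd ((h1 x).1 (by rw [hc2]; rfl)) hxv
                have := hcomp x hxd hxa ⟨w, hw, hc⟩
                have : (pvRound (PySem.Set.ofList allowed) start dist).2 = true :=
                  rch.2 ⟨x, hxd, this⟩
                rw [hch] at this
                cases this
            unfold pvLoopA pvLoopB
            rw [hBe, heq]
            simp [hq, hch, hq'nil, loopA_nil]
          · -- a relaxation fired: both sides advance one level in lockstep
            have main := ih vis' q' (k + 1) (pvRound (PySem.Set.ofList allowed) start dist).1 ?_ ?_ ?_
            · unfold pvLoopA pvLoopB
              rw [hBe, heq]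
              simp only [hq, Bool.false_eq_true, if_false, hch, if_true]
              exact main
            · -- h1' : keys of the relaxed dict are exactly the new visited set
              intro x
              constructor
              · intro hx
                obtain ⟨v, hv'⟩ := Option.isSome_iff_exists.mp hx
                rcases hdx : dist.get? x with _ | u
                · obtain ⟨_, hxa, w, hw, hc⟩ := rnew x v hdx hv'
                  exact (hv x).2 (Or.inr ⟨⟨w, hw, hc⟩, hxa⟩)
                · exact (hv x).2 (Or.inl ((h1 x).1 (by rw [hdx]; rfl)))
              · intro hx
                rcases (hv x).1 hx with hx' | ⟨⟨w, hw, hc⟩, hxa⟩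
                · obtain ⟨v, hv'⟩ := Option.isSome_iff_exists.mp ((h1 x).2 hx')
                  rw [rmono x v hv']; rfl
                · rcases hdx : dist.get? x with _ | u
                  · exact hcomp x hdx hxa ⟨w, hw, hc⟩
                  · rw [rmono x u hdx]; rfl
            · -- pvInv at level k+1
              refine ⟨rnd, ?_, ?_, ?_⟩
              · intro x
                constructor
                · intro hx
                  rcases hdx : dist.get? x with _ | u
                  · obtain ⟨_, hxa, w, hw, hc⟩ := rnew x (k + 1) hdx hx
                    exact (hq' x).2 (Or.inr ⟨⟨w, hw, hc⟩, hxa, hnotvis x hdx⟩)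
                  · have := rmono x u hdx
                    rw [hx] at this
                    injection this with hu
                    have := h3 x u hdx
                    omega
                · intro hx
                  rcases (hq' x).1 hx with hx' | ⟨⟨w, hw, hc⟩, hxa, hxv⟩
                  · exact absurd hx' List.not_mem_nil
                  · have hxd : dist.get? x = none := by
                      rcases hc2 : dist.get? x with _ | v
                      · rfl
                      · exact absurd ((h1 x).1 (by rw [hc2]; rfl)) hxv
                    obtain ⟨v, hv'⟩ := Option.isSome_iff_exists.mp (hcomp x hxd hxa ⟨w, hw, hc⟩)
                    obtain ⟨hvk, _, _⟩ := rnew x v hxd hv'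
                    rw [hv', hvk]
              · intro x v hx
                rcases hdx : dist.get? x with _ | u
                · obtain ⟨hvk, _, _⟩ := rnew x v hdx hx
                  omega
                · have := rmono x u hdx
                  rw [hx] at this
                  injection this with hu
                  have := h3 x u hdx
                  omega
              · intro w x dw hw hdw hc hxa
                have hwd : dist.get? w = some dw := by
                  rcases hdw' : dist.get? w with _ | u
                  · obtain ⟨hvk, _, _⟩ := rnew w dw hdw' hw
                    omega
                  · have := rmono w u hdw'
                    rw [hw] at this
                    injection this with hu
                    rw [hu]
                have hdwk : dw ≤ k := h3 w dw hwd
                rcases lt_or_eq_of_le hdwk with hlt | heq'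
                · obtain ⟨v, hv', hle⟩ := h4 w x dw hwd hlt hc hxa
                  exact ⟨v, rmono x v hv', hle⟩
                · subst heq'
                  rcases hdx : dist.get? x with _ | u
                  · obtain ⟨v, hv'⟩ := Option.isSome_iff_exists.mp
                      (hcomp x hdx hxa ⟨w, (h2 w).1 hwd, hc⟩)
                    obtain ⟨hvk, _, _⟩ := rnew x v hdx hv'
                    exact ⟨v, hv', by omega⟩
                  · exact ⟨u, rmono x u hdx, by have := h3 x u hdx; omega⟩
            · -- h5' : if the relaxed dict knows end_, it is on the new frontier
              intro v hv'
              obtain ⟨_, hxa, w, hw, hc⟩ := rnew end_ v hBe hv'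
              exact (hq' end_).2 (Or.inr ⟨⟨w, hw, hc⟩, hxa, hnotvis end_ hBe⟩)

-- ===== VERDICT (by name: the statement is the Claim_ definition above) =====
theorem starting_spec : Claim_equal_starting := by
  intro start end_ allowed _
  unfold Spec_starting starting starting_alt
  refine loop_eq start end_ allowed (allowed.length + 2) _ _ 0 _ ?_ ⟨?_, ?_, ?_, ?_⟩ ?_
  · intro x
    rw [PySem.Dict.get?_insert]
    by_cases hx : x = start <;>
      simp [hx, PySem.Dict.get?_empty, PySem.Set.empty]
  · exact PySem.Dict.nodup_keys_insert _ _ _ PySem.Dict.nodup_keys_empty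
  · intro x
    rw [PySem.Dict.get?_insert]
    by_cases hx : x = start <;> simp [hx, PySem.Dict.get?_empty]
  · intro x v hx
    rw [PySem.Dict.get?_insert] at hx
    by_cases h : x = start
    · simp [h] at hx; omega
    · rw [if_neg h, PySem.Dict.get?_empty] at hx; cases hx
  · intro w x dw hw hdw _ _
    rw [PySem.Dict.get?_insert] at hw
    by_cases h : w = start
    · simp [h] at hw; omega
    · rw [if_neg h, PySem.Dict.get?_empty] at hw; cases hw
  · intro v hv
    rw [PySem.Dict.get?_insert] at hv
    by_cases h : end_ = start
    · simp [h]
    · rw [if_neg h, PySem.Dict.get?_empty] at hv; cases hv
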